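-- pv_equiv track=rewrite | github.com/fuchami/nlp100knock | ch1/08.py | cipher
-- ===== SOURCE A (Python) =====
-- def cipher(raw):
--     result = ""
--     for w in raw:
--         if ord(w) > 96 and ord(w) < 123:
--             result += chr(219 -ord(w))
--         else:
--             return raw
--     return result
-- ===== SOURCE B (Python) =====
-- def cipher(raw):
--     if all(96 < ord(w) < 123 for w in raw):
--         return ''.join(chr(219 - ord(w)) for w in raw)
--     return raw
-- ===== Notes on version B (the rewrite author's own statement) =====
-- stated objective: simpler
-- what changed: Replaces A's single accumulating loop with an early return from inside it by a predicate-then-transform decomposition: one all() validity pass, then a join of the transformed chars (or raw unchanged).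
import Mathlib
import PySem

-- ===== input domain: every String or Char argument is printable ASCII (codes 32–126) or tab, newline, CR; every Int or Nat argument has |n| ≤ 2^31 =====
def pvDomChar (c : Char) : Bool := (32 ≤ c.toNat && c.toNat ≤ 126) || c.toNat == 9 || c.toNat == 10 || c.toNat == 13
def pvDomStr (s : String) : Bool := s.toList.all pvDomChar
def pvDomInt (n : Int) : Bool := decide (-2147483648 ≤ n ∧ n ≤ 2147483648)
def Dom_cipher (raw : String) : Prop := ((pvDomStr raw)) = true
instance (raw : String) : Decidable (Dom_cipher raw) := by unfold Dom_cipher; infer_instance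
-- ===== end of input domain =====

-- ===== PORT A =====
-- port of A: accumulating loop at char level; the early `return raw` is the else branch
def cipherGo (raw : String) : List Char → List Char → String
  | [], result => String.mk result
  | w :: ws, result =>
    if w.toNat > 96 ∧ w.toNat < 123 then
      cipherGo raw ws (result ++ [Char.ofNat (219 - w.toNat)])
    else raw

def cipher (raw : String) : String := cipherGo raw raw.toList []

-- ===== PORT B =====
-- port of B: validity predicate pass, then a transform pass
def cipher_alt (raw : String) : String :=
  if raw.toList.all (fun w => 96 < w.toNat && w.toNat < 123) then
    String.mk (raw.toList.map (fun w => Char.ofNat (219 - w.toNat)))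
  else raw

-- ===== PRECONDITION & SPEC =====
def Spec_cipher (raw : String) (out : String) : Prop := out = cipher_alt raw
instance (raw : String) (out : String) : Decidable (Spec_cipher raw out) := by unfold Spec_cipher; infer_instance

-- ===== CLAIM (what is proved, stated in full; the proofs are below) =====
def Claim_equal_cipher : Prop := ∀ (raw : String), Dom_cipher raw → Spec_cipher raw (cipher raw)

-- ===== LEMMAS AND PROOFS =====

-- ===== VERDICT (by name: the statement is the Claim_ definition above) =====
theorem cipherGo_eq (raw : String) (l acc : List Char) :
    cipherGo raw l acc =
      if l.all (fun w => 96 < w.toNat && w.toNat < 123) then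
        String.mk (acc ++ l.map (fun w => Char.ofNat (219 - w.toNat)))
      else raw := by
  induction l generalizing acc with
  | nil => simp [cipherGo]
  | cons w ws ih =>
    simp only [cipherGo, List.all_cons, List.map_cons]
    by_cases h : w.toNat > 96 ∧ w.toNat < 123
    · rw [if_pos h, ih]
      have : (96 < w.toNat && w.toNat < 123) = true := by
        simp [h.1, h.2]
      simp [this]
    · rw [if_neg h]
      have : (96 < w.toNat && w.toNat < 123) = false := by
        rcases not_and_or.mp h with h' | h' <;> simp_all
      simp [this]

theorem cipher_spec : Claim_equal_cipher := by
  intro raw _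
  unfold Spec_cipher cipher cipher_alt
  rw [cipherGo_eq]
  simp
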